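-- pv_equiv track=rewrite | github.com/ConvLab/ConvLab-3 | data/unified_datasets/multiwoz21/booking_remapper.py | deflat_acts
-- ===== SOURCE A (Python) =====
-- def deflat_acts(flattened_acts):
--
--     dialog_acts = dict()
--
--     for act in flattened_acts:
--         domain, intent, slot, value = act
--         if f"{domain}-{intent}" not in dialog_acts.keys():
--             dialog_acts[f"{domain}-{intent}"] = [[slot, value]]
--         else:
--             dialog_acts[f"{domain}-{intent}"].append([slot, value])
--
--     return dialog_acts
-- ===== SOURCE B (Python) =====
-- def deflat_acts(flattened_acts):
--     # Two-pass grouping: ordered dedup of keys, then one filter pass per key.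
--     keys = dict.fromkeys(f"{d}-{i}" for d, i, _, _ in flattened_acts)
--     return {k: [[s, v] for d, i, s, v in flattened_acts if f"{d}-{i}" == k]
--             for k in keys}
-- ===== Notes on version B (the rewrite author's own statement) =====
-- stated objective: alternative
-- what changed: Replaces the single-pass dict-append loop with a two-pass group-by: an ordered dedup of the domain-intent keys followed by one filter/comprehension per key.
import Mathlib
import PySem

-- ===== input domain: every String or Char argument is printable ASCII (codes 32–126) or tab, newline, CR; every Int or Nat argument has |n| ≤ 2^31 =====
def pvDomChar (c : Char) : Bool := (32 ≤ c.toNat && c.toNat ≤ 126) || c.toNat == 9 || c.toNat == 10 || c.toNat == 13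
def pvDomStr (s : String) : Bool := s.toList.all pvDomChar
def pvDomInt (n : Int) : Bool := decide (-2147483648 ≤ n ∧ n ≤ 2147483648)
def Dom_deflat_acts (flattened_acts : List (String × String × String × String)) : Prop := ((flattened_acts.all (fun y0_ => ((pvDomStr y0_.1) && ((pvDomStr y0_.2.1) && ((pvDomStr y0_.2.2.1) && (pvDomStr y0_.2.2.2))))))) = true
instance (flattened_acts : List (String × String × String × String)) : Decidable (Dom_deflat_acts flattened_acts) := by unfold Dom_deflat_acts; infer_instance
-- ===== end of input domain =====

-- B groups the acts in two passes (ordered dedup of keys, then one filter per key) instead of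
-- A's single-pass dict-append loop; same return value, no speed claim (objective: alternative).

-- ===== PORT A =====
def deflat_acts (flattened_acts : List (String × String × String × String)) : List (String × List (List String)) :=
  (flattened_acts.foldl (fun d act =>
    match d.get? (act.1 ++ "-" ++ act.2.1) with
    | none => d.insert (act.1 ++ "-" ++ act.2.1) [[act.2.2.1, act.2.2.2]]
    | some xs => d.insert (act.1 ++ "-" ++ act.2.1) (xs ++ [[act.2.2.1, act.2.2.2]]))
    (PySem.Dict.empty : PySem.Dict String (List (List String)))).items

-- ===== PORT B =====
def deflat_acts_alt (flattened_acts : List (String × String × String × String)) : List (String × List (List String)) :=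
  (PySem.List.dedup (flattened_acts.map (fun a => a.1 ++ "-" ++ a.2.1))).map
    (fun k => (k, (flattened_acts.filter (fun a => a.1 ++ "-" ++ a.2.1 == k)).map
                    (fun a => [a.2.2.1, a.2.2.2])))

-- ===== PRECONDITION & SPEC =====
def Spec_deflat_acts (flattened_acts : List (String × String × String × String)) (out : List (String × List (List String))) : Prop := out = deflat_acts_alt flattened_acts
instance (flattened_acts : List (String × String × String × String)) (out : List (String × List (List String))) : Decidable (Spec_deflat_acts flattened_acts out) := by unfold Spec_deflat_acts; infer_instance

-- ===== CLAIM (what is proved, stated in full; the proofs are below) =====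
def Claim_equal_deflat_acts : Prop := ∀ (flattened_acts : List (String × String × String × String)), Dom_deflat_acts flattened_acts → Spec_deflat_acts flattened_acts (deflat_acts flattened_acts)

-- ===== LEMMAS AND PROOFS =====

-- A's branch on `get?` is exactly `modify key [] (· ++ [pair])`.
theorem deflat_step_eq_modify (d : PySem.Dict String (List (List String)))
    (a : String × String × String × String) :
    (match d.get? (a.1 ++ "-" ++ a.2.1) with
     | none => d.insert (a.1 ++ "-" ++ a.2.1) [[a.2.2.1, a.2.2.2]]
     | some xs => d.insert (a.1 ++ "-" ++ a.2.1) (xs ++ [[a.2.2.1, a.2.2.2]]))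
    = d.modify (a.1 ++ "-" ++ a.2.1) [] (· ++ [[a.2.2.1, a.2.2.2]]) := by
  have hmod : d.modify (a.1 ++ "-" ++ a.2.1) [] (· ++ [[a.2.2.1, a.2.2.2]])
      = d.insert (a.1 ++ "-" ++ a.2.1) (d.getD (a.1 ++ "-" ++ a.2.1) [] ++ [[a.2.2.1, a.2.2.2]]) := rfl
  cases h : d.get? (a.1 ++ "-" ++ a.2.1) with
  | none => rw [hmod, PySem.Dict.getD_of_get?_eq_none _ _ h]; rfl
  | some xs => rw [hmod, PySem.Dict.getD_of_get?_eq_some _ _ h]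

theorem deflat_loop_eq (fa : List (String × String × String × String)) :
    fa.foldl (fun d act =>
      match d.get? (act.1 ++ "-" ++ act.2.1) with
      | none => d.insert (act.1 ++ "-" ++ act.2.1) [[act.2.2.1, act.2.2.2]]
      | some xs => d.insert (act.1 ++ "-" ++ act.2.1) (xs ++ [[act.2.2.1, act.2.2.2]]))
      (PySem.Dict.empty : PySem.Dict String (List (List String)))
    = (fa.map (fun a => (a.1 ++ "-" ++ a.2.1, [a.2.2.1, a.2.2.2]))).foldl
        (fun d p => d.modify p.1 [] (· ++ [p.2])) PySem.Dict.empty := by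
  rw [List.foldl_map]
  congr 1
  funext d a
  exact deflat_step_eq_modify d a

theorem deflat_acts_eq_alt (fa : List (String × String × String × String)) :
    deflat_acts fa = deflat_acts_alt fa := by
  unfold deflat_acts deflat_acts_alt
  rw [deflat_loop_eq]
  set l := fa.map (fun a => (a.1 ++ "-" ++ a.2.1, [a.2.2.1, a.2.2.2])) with hl
  set D := l.foldl (fun d p => d.modify p.1 [] (· ++ [p.2]))
    (PySem.Dict.empty : PySem.Dict String (List (List String))) with hD
  have hnodup : D.keys.Nodup := by
    rw [hD]
    exact PySem.Dict.nodup_keys_foldl_modify_key l (fun p => p.1) [] (fun d p => (· ++ [p.2]))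
      PySem.Dict.empty PySem.Dict.nodup_keys_empty
  have hkeys : D.keys = PySem.List.dedup (fa.map (fun a => a.1 ++ "-" ++ a.2.1)) := by
    rw [hD]
    rw [PySem.Dict.keys_foldl_modify_key l (fun p => p.1) [] (fun d p => (· ++ [p.2]))]
    rw [PySem.Dict.keys_empty, PySem.Set.update_nil_left, PySem.List.dedup_eq_ofList, hl,
      List.map_map]
    rfl
  have hgetD : ∀ k : String, D.getD k []
      = (fa.filter (fun a => a.1 ++ "-" ++ a.2.1 == k)).map (fun a => [a.2.2.1, a.2.2.2]) := by
    intro k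
    rw [hD, PySem.Dict.getD_foldl_modify_append l PySem.Dict.empty k, PySem.Dict.getD_empty,
      List.nil_append, hl, List.filter_map, List.map_map]
    rfl
  rw [PySem.Dict.items_eq_map_keys D hnodup [], hkeys]
  exact List.map_congr_left (fun k _ => by rw [hgetD k])

-- ===== VERDICT (by name: the statement is the Claim_ definition above) =====
theorem deflat_acts_spec : Claim_equal_deflat_acts := by
  intro fa _
  exact deflat_acts_eq_alt fa
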